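-- pv_equiv track=rewrite | github.com/starkbank/iso8583-python | starkbank/iso8583/utils/parser.py | unparsePds
-- ===== SOURCE A (Python) =====
-- def unparsePds(json):
--     string = ""
--     for key, value in sorted(json.items()):
--         tag = key.replace("PDS", "")
--         length = str(len(value)).zfill(3)
--         partial = tag + length + value
--         if len(string + partial) > 999:
--             break
--         string += partial
--         json.pop(key)
--     return string
-- ===== SOURCE B (Python) =====
-- def unparsePds(json):
--     # Same mutation as the original: pops exactly the included keys from json.
--     items = sorted(json.items())
--     partials = [k.replace("PDS", "") + str(len(v)).zfill(3) + v for k, v in items]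
--     cums, total = [], 0
--     for p in partials:
--         total += len(p)
--         cums.append(total)
--     cutoff = sum(1 for c in cums if c <= 999)
--     for k, _ in items[:cutoff]:
--         json.pop(k)
--     return "".join(partials[:cutoff])
-- ===== Notes on version B (the rewrite author's own statement) =====
-- stated objective: alternative
-- what changed: Replaces A's single sorted loop with an in-loop break by three separate passes: build the full list of sorted TLV partials, derive the cutoff as a count of cumulative lengths that stay within 999 (no break; valid because the running totals are strictly increasing), and join the kept prefix (popping exactly those keys).
import Mathlib
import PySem

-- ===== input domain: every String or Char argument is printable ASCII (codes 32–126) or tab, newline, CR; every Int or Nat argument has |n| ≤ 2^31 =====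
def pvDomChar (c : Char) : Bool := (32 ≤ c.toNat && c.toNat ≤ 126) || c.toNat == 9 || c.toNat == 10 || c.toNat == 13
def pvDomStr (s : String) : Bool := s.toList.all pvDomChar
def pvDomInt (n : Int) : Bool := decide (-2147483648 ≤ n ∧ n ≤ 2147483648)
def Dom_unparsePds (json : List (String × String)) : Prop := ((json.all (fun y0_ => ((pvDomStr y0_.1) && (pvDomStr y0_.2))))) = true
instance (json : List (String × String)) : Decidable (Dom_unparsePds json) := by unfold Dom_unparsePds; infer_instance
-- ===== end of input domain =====

-- B splits A's single break-loop into separate passes: build all sorted TLV partials, compute the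
-- cutoff as a count over the cumulative-length list (no break), then join the kept prefix; the
-- equivalence is about the return value only (both Pythons also pop exactly the included keys
-- from the json dict, the same mutation).


-- ===== PORT A =====
def unparsePdsGo : List (String × String) → String → String
  | [], string => string
  | (key, value) :: rest, string =>
    let tag := PySem.Str.replace key "PDS" ""
    let length := PySem.Str.zfill (PySem.Int.toStr (PySem.Str.len value)) 3
    let part := tag ++ length ++ value
    if PySem.Str.len (string ++ part) > 999 then string
    else unparsePdsGo rest (string ++ part)

def unparsePds (json : List (String × String)) : String :=
  unparsePdsGo (PySem.List.sorted2 json (fun kv => kv.1) (fun kv => kv.2)) ""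

-- ===== PORT B =====
def pdsPartial (kv : String × String) : String :=
  PySem.Str.replace kv.1 "PDS" "" ++ PySem.Str.zfill (PySem.Int.toStr (PySem.Str.len kv.2)) 3 ++ kv.2

def unparsePds_alt (json : List (String × String)) : String :=
  let items := PySem.List.sorted2 json (fun kv => kv.1) (fun kv => kv.2)
  let partials := items.map pdsPartial
  let cums := (partials.foldl
      (fun (st : Int × List Int) p => (st.1 + PySem.Str.len p, st.2 ++ [st.1 + PySem.Str.len p]))
      (0, [])).2
  let cutoff := cums.countP (fun c => decide (c ≤ 999))
  PySem.Str.join "" (partials.take cutoff)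

-- ===== PRECONDITION & SPEC =====
def Spec_unparsePds (json : List (String × String)) (out : String) : Prop := out = unparsePds_alt json
instance (json : List (String × String)) (out : String) : Decidable (Spec_unparsePds json out) := by unfold Spec_unparsePds; infer_instance

-- ===== CLAIM (what is proved, stated in full; the proofs are below) =====
def Claim_equal_unparsePds : Prop := ∀ (json : List (String × String)), Dom_unparsePds json → Spec_unparsePds json (unparsePds json)

-- ===== LEMMAS AND PROOFS =====

/-- A's loop on the list of already-built partial strings. -/
def goP : List String → String → String
  | [], s => s
  | p :: ps, s => if PySem.Str.len (s ++ p) > 999 then s else goP ps (s ++ p)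

/-- Recursive characterisation of B's running-total list. -/
def cumsOf : List String → List Int
  | [] => []
  | p :: ps => PySem.Str.len p :: (cumsOf ps).map (PySem.Str.len p + ·)

lemma go_eq_goP (items : List (String × String)) (s : String) :
    unparsePdsGo items s = goP (items.map pdsPartial) s := by
  induction items generalizing s with
  | nil => rfl
  | cons kv rest ih =>
    obtain ⟨k, v⟩ := kv
    simp only [unparsePdsGo, goP, List.map_cons, pdsPartial, ih]

lemma foldl_cums (ps : List String) (t : Int) (acc : List Int) :
    (ps.foldl
      (fun (st : Int × List Int) p => (st.1 + PySem.Str.len p, st.2 ++ [st.1 + PySem.Str.len p]))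
      (t, acc)).2 = acc ++ (cumsOf ps).map (t + ·) := by
  induction ps generalizing t acc with
  | nil => simp [cumsOf]
  | cons p ps ih =>
    simp only [List.foldl_cons, cumsOf, List.map_cons, List.map_map]
    rw [ih]
    simp [add_assoc]

lemma cumsOf_nonneg (ps : List String) : ∀ c ∈ cumsOf ps, 0 ≤ c := by
  induction ps with
  | nil => simp [cumsOf]
  | cons p ps ih =>
    intro c hc
    have hp : (0:Int) ≤ PySem.Str.len p := by simp [pysem]
    simp only [cumsOf, List.mem_cons, List.mem_map] at hc
    rcases hc with h | ⟨d, hd, rfl⟩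
    · omega
    · have := ih d hd; omega

lemma join_empty_cons (p : String) (ps : List String) :
    PySem.Str.join "" (p :: ps) = p ++ PySem.Str.join "" ps := by
  cases ps with
  | nil => simp [PySem.Str.join, PySem.Chars.join_singleton, PySem.Chars.join_nil]
  | cons q t => simp [PySem.Str.join, PySem.Chars.join_cons_cons]

lemma goP_eq (ps : List String) (s : String) :
    goP ps s = s ++ PySem.Str.join "" (ps.take
      ((cumsOf ps).countP (fun c => decide (PySem.Str.len s + c ≤ 999)))) := by
  induction ps generalizing s with
  | nil => simp [goP, cumsOf, PySem.Str.join, PySem.Chars.join_nil]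
  | cons p ps ih =>
    have hlen : PySem.Str.len (s ++ p) = PySem.Str.len s + PySem.Str.len p := by simp [pysem]
    by_cases h : PySem.Str.len s + PySem.Str.len p > 999
    · -- break: the head cumulative sum already overflows, so every later one does too
      have hcount : (cumsOf (p :: ps)).countP (fun c => decide (PySem.Str.len s + c ≤ 999)) = 0 := by
        rw [List.countP_eq_zero]
        intro c hc
        simp only [cumsOf, List.mem_cons, List.mem_map] at hc
        rcases hc with rfl | ⟨d, hd, rfl⟩
        · simp only [decide_eq_true_eq]; omega
        · have := cumsOf_nonneg _ d hd
          simp only [decide_eq_true_eq]; omega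
      rw [hcount]
      simp only [goP, hlen, List.take_zero, PySem.Str.join, List.map_nil, PySem.Chars.join_nil]
      rw [if_pos (by omega)]
      simp
    · -- continue: the head counts, the tail's threshold shifts by len p
      have hcount : (cumsOf (p :: ps)).countP (fun c => decide (PySem.Str.len s + c ≤ 999)) =
          (cumsOf ps).countP (fun c => decide (PySem.Str.len (s ++ p) + c ≤ 999)) + 1 := by
        simp only [cumsOf, List.countP_cons, List.countP_map, hlen]
        have hhead : (decide (PySem.Str.len s + PySem.Str.len p ≤ 999)) = true := by
          simp only [decide_eq_true_eq]; omega
        rw [hhead, if_pos rfl]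
        congr 1
        apply List.countP_congr
        intro c _
        simp only [Function.comp_apply, decide_eq_true_eq]
        omega
      rw [hcount]
      simp only [goP, hlen]
      rw [if_neg (by omega)]
      rw [ih, List.take_succ_cons, join_empty_cons, ← String.append_assoc, hlen]

-- ===== VERDICT (by name: the statement is the Claim_ definition above) =====
theorem unparsePds_spec : Claim_equal_unparsePds := by
  intro json _
  unfold Spec_unparsePds unparsePds unparsePds_alt
  rw [go_eq_goP, goP_eq]
  simp only [foldl_cums, List.nil_append]
  simp
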